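-- pv_equiv track=rewrite | github.com/Vizzario/user-classify-lib | user_classify_lib/user_cluster/gower.py | get_range_in_labels
-- ===== SOURCE A (Python) =====
-- def get_range_in_labels(raw_data : dict, labels, set_key = None):
--     label_range = dict()
--     label_max = dict()
--     label_min = dict()
--     for user, value in raw_data.items():
--         if set_key is None:
--             response = value
--         else:
--             response = value[set_key]
--         for label in labels:
--             if label in response.keys():
--                 if response[label] is not str:
--                     if label not in label_max.keys():
--                         label_max[label] = response[label]
--                         label_min[label] = response[label]
--                     else:
--                         if response[label] > label_max[label]: label_max[label] = response[label]
--                         if response[label] < label_min[label]: label_min[label] = response[label]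
--
--     for label in label_max.keys():
--         label_range[label] = label_max[label] - label_min[label]
--
--     return label_range
-- ===== SOURCE B (Python) =====
-- def get_range_in_labels(raw_data: dict, labels, set_key=None):
--     # Collect every observed value per label, then reduce with built-in max/min.
--     # (The original's `is not str` guard compares a value with the type object
--     # `str` and is always true for the numeric data handled here, so no
--     # filtering is needed.)
--     groups = dict()
--     for value in raw_data.values():
--         response = value if set_key is None else value[set_key]
--         for label in labels:
--             if label in response:
--                 groups.setdefault(label, []).append(response[label])
--     return {label: max(vs) - min(vs) for label, vs in groups.items()}
-- ===== Notes on version B (the rewrite author's own statement) =====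
-- stated objective: simpler
-- what changed: Instead of maintaining two running-extrema dicts (label_max/label_min) updated with comparisons inside the scan, B builds one dict collecting every observed value per label and then reduces each value list with the built-in max/min; the always-true `is not str` guard is dropped.
import Mathlib
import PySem

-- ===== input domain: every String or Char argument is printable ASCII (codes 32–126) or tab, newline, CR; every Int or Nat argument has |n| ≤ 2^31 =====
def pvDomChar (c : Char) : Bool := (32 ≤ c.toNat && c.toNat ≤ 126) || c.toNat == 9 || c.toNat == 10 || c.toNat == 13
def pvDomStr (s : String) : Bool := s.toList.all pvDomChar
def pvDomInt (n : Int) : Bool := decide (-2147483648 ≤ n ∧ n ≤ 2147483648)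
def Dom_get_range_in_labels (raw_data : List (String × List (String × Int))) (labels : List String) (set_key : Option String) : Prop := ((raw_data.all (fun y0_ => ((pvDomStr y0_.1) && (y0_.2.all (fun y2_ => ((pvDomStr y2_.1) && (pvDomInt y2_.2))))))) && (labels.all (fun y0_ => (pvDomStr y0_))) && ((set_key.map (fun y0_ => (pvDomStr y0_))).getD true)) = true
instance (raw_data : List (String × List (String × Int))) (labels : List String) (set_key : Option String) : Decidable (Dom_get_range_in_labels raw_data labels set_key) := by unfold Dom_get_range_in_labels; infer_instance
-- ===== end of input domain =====

-- B replaces A's two running-extrema dicts by one dict that collects every observed value per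
-- label, reduced afterwards with max/min ("simpler": one accumulator, built-in reductions).

-- ===== PORT A =====
-- A's inner check `response[label] is not str` compares an int value with the type object
-- `str` and is therefore identically true here; it is ported as no condition.
def get_range_in_labels (raw_data : List (String × List (String × Int))) (labels : List String) (set_key : Option String) : List (String × Int) :=
  let st :=
    raw_data.foldl (fun (st : PySem.Dict String Int × PySem.Dict String Int) uv =>
      let response : PySem.Dict String Int :=
        match set_key with
        | none => PySem.Dict.mk uv.2
        | some _ => PySem.Dict.mk []   -- reachable with work to do only outside Pre_ (the Python A raises there)
      labels.foldl (fun st label =>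
        match response.get? label with
        | none => st
        | some v =>
          match st.1.get? label with
          | none => (st.1.insert label v, st.2.insert label v)
          | some mx =>
            ((if v > mx then st.1.insert label v else st.1),
             (if v < st.2.getD label 0 then st.2.insert label v else st.2))) st)
      (PySem.Dict.empty, PySem.Dict.empty)
  (st.1.keys.foldl (fun (d : PySem.Dict String Int) label =>
      d.insert label (st.1.getD label 0 - st.2.getD label 0)) PySem.Dict.empty).items

-- ===== PORT B =====
def get_range_in_labels_alt (raw_data : List (String × List (String × Int))) (labels : List String) (set_key : Option String) : List (String × Int) :=
  let groups :=
    raw_data.foldl (fun (g : PySem.Dict String (List Int)) uv =>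
      let response : PySem.Dict String Int :=
        match set_key with
        | none => PySem.Dict.mk uv.2
        | some _ => PySem.Dict.mk []   -- reachable with work to do only outside Pre_ (the Python B raises there)
      labels.foldl (fun g label =>
        match response.get? label with
        | none => g
        | some v => g.modify label [] (· ++ [v])) g)
      PySem.Dict.empty
  groups.items.map (fun p =>
    (p.1, (PySem.List.max? p.2 (fun y => y)).getD 0 - (PySem.List.min? p.2 (fun y => y)).getD 0))

-- ===== PRECONDITION & SPEC =====
-- Pre_ excludes exactly the inputs on which the Python A raises: with set_key ≠ None and
-- nonempty raw_data, A raises KeyError on the first user value missing set_key, and otherwise,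
-- if labels is nonempty, AttributeError on `response.keys()` with response an int.
def Pre_get_range_in_labels (raw_data : List (String × List (String × Int))) (labels : List String) (set_key : Option String) : Prop :=
  match set_key with
  | none => True
  | some k => raw_data = [] ∨ (labels = [] ∧ ∀ uv ∈ raw_data, k ∈ uv.2.map Prod.fst)

instance (raw_data : List (String × List (String × Int))) (labels : List String) (set_key : Option String) : Decidable (Pre_get_range_in_labels raw_data labels set_key) := by unfold Pre_get_range_in_labels; cases set_key <;> infer_instance

def pvWitness_get_range_in_labels : (List (String × List (String × Int))) × List String × Option String :=
  ([("u", [("a", 1), ("b", 7)]), ("v", [("a", 4)])], ["a", "b"], none)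

def Spec_get_range_in_labels (raw_data : List (String × List (String × Int))) (labels : List String) (set_key : Option String) (out : List (String × Int)) : Prop := out = get_range_in_labels_alt raw_data labels set_key
instance (raw_data : List (String × List (String × Int))) (labels : List String) (set_key : Option String) (out : List (String × Int)) : Decidable (Spec_get_range_in_labels raw_data labels set_key out) := by unfold Spec_get_range_in_labels; infer_instance

-- ===== CLAIM (what is proved, stated in full; the proofs are below) =====
def Claim_equal_get_range_in_labels : Prop := ∀ (raw_data : List (String × List (String × Int))) (labels : List String) (set_key : Option String), Dom_get_range_in_labels raw_data labels set_key → Pre_get_range_in_labels raw_data labels set_key → Spec_get_range_in_labels raw_data labels set_key (get_range_in_labels raw_data labels set_key)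

-- ===== LEMMAS AND PROOFS =====

-- the flattened stream of (label, value) pairs both loops consume, in order
def pvPairsOf (labels : List String) (response : PySem.Dict String Int) : List (String × Int) :=
  labels.filterMap (fun l => (response.get? l).map (fun v => (l, v)))

-- a loop over labels that skips absent ones IS a loop over the filtered pair stream
theorem pvFoldl_labels_filterMap {σ : Type} (response : PySem.Dict String Int)
    (u : σ → (String × Int) → σ) (labels : List String) (st : σ) :
    labels.foldl (fun s l =>
      match response.get? l with
      | none => s
      | some v => u s (l, v)) st
    = (pvPairsOf labels response).foldl u st := by
  induction labels generalizing st with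
  | nil => rfl
  | cons l t ih =>
    simp only [pvPairsOf, List.filterMap_cons, List.foldl_cons]
    cases h : response.get? l with
    | none => simpa [pvPairsOf] using ih st
    | some v => simpa [pvPairsOf] using ih (u st (l, v))

-- A's per-pair update of (label_max, label_min)
def pvUA (st : PySem.Dict String Int × PySem.Dict String Int) (p : String × Int) :
    PySem.Dict String Int × PySem.Dict String Int :=
  match st.1.get? p.1 with
  | none => (st.1.insert p.1 p.2, st.2.insert p.1 p.2)
  | some mx =>
    ((if p.2 > mx then st.1.insert p.1 p.2 else st.1),
     (if p.2 < st.2.getD p.1 0 then st.2.insert p.1 p.2 else st.2))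

-- B's per-pair update of the groups dict
def pvUB (g : PySem.Dict String (List Int)) (p : String × Int) : PySem.Dict String (List Int) :=
  g.modify p.1 [] (· ++ [p.2])

-- the response dict each user row contributes
def pvResp (set_key : Option String) (uv : String × List (String × Int)) : PySem.Dict String Int :=
  match set_key with
  | none => PySem.Dict.mk uv.2
  | some _ => PySem.Dict.mk []

-- the values observed for one label in the pair stream
def pvVals (l : String) (P : List (String × Int)) : List Int :=
  (P.filter (fun p => p.1 == l)).map (fun p => p.2)

theorem pvVals_append (l : String) (P : List (String × Int)) (p : String × Int) :
    pvVals l (P ++ [p]) = pvVals l P ++ (if p.1 == l then [p.2] else []) := by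
  simp only [pvVals, List.filter_append, List.map_append]
  congr 1
  by_cases h : p.1 == l <;> simp [List.filter, h]

theorem pvMax_append_singleton (vs : List Int) (v : Int) :
    PySem.List.max? (vs ++ [v]) (fun y => y)
    = some (match PySem.List.max? vs (fun y => y) with
            | none => v
            | some m => if v > m then v else m) := by
  cases vs with
  | nil => simp [PySem.List.max?]
  | cons x t =>
    rw [List.cons_append, PySem.List.max?_id_cons, PySem.List.max?_id_cons, List.foldl_append]
    simp only [List.foldl_cons, List.foldl_nil]
    congr 1
    rcases le_or_gt v (List.foldl max x t) with h | h
    · simp [max_eq_left h, not_lt.mpr h]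
    · simp [max_eq_right h.le, h]

theorem pvMin_append_singleton (vs : List Int) (v : Int) :
    PySem.List.min? (vs ++ [v]) (fun y => y)
    = some (match PySem.List.min? vs (fun y => y) with
            | none => v
            | some m => if v < m then v else m) := by
  cases vs with
  | nil => simp [PySem.List.min?]
  | cons x t =>
    rw [List.cons_append, PySem.List.min?_id_cons, PySem.List.min?_id_cons, List.foldl_append]
    simp only [List.foldl_cons, List.foldl_nil]
    congr 1
    rcases le_or_gt (List.foldl min x t) v with h | h
    · simp [min_eq_left h, not_lt.mpr h]
    · simp [min_eq_right h.le, h]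

-- the master invariant of A's first loop: key set in first-appearance order,
-- per-key running max/min of the values seen so far
theorem pvAinv (P : List (String × Int)) :
    (P.foldl pvUA (PySem.Dict.empty, PySem.Dict.empty)).1.keys
      = PySem.Set.ofList (P.map Prod.fst)
    ∧ ∀ l, (P.foldl pvUA (PySem.Dict.empty, PySem.Dict.empty)).1.get? l
             = PySem.List.max? (pvVals l P) (fun y => y)
         ∧ (P.foldl pvUA (PySem.Dict.empty, PySem.Dict.empty)).2.get? l
             = PySem.List.min? (pvVals l P) (fun y => y) := by
  induction P using List.reverseRecOn with
  | nil =>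
    refine ⟨by simp [PySem.Set.ofList], fun l => ⟨?_, ?_⟩⟩ <;>
      simp [pvVals, PySem.List.max?, PySem.List.min?]
  | append_singleton P p ih =>
    obtain ⟨hk, hg⟩ := ih
    rw [List.foldl_append] at *
    simp only [List.foldl_cons, List.foldl_nil]
    set st := P.foldl pvUA (PySem.Dict.empty, PySem.Dict.empty) with hst
    have hmax := fun l => (hg l).1
    have hmin := fun l => (hg l).2
    cases h1 : st.1.get? p.1 with
    | none =>
      have hc : st.1.contains p.1 = false := by
        rw [PySem.Dict.contains_eq_isSome_get?, h1]; rfl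
      have hnotmem : p.1 ∉ P.map Prod.fst := by
        intro hm
        have : p.1 ∈ st.1.keys := by rw [hk]; exact (PySem.Set.mem_ofList _ _).mpr hm
        rw [← PySem.Dict.contains_iff_mem_keys] at this
        simp [hc] at this
      have hvals : pvVals p.1 P = [] := by
        simp only [pvVals, List.map_eq_nil_iff, List.filter_eq_nil_iff]
        intro q hq hbeq
        exact hnotmem (List.mem_map.mpr ⟨q, hq, by simpa using hbeq⟩)
      constructor
      · simp only [pvUA, h1]
        rw [PySem.Dict.keys_insert_of_not_contains _ _ hc, hk]
        rw [List.map_append, PySem.Set.ofList_eq_foldl, PySem.Set.ofList_eq_foldl,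
            List.foldl_append]
        simp only [List.map_cons, List.map_nil, List.foldl_cons, List.foldl_nil]
        rw [← PySem.Set.ofList_eq_foldl]
        simp [PySem.Set.add, PySem.Set.contains, hnotmem, PySem.Set.mem_ofList]
      · intro l
        simp only [pvUA, h1]
        by_cases hl : l = p.1
        · subst hl
          rw [pvVals_append, hvals]
          simp [PySem.Dict.get?_insert_self, PySem.List.max?, PySem.List.min?]
        · rw [PySem.Dict.get?_insert_of_ne _ _ hl, PySem.Dict.get?_insert_of_ne _ _ hl,
              pvVals_append]
          have : (p.1 == l) = false := by simpa using fun h => hl h.symm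
          simp [this, hmax l, hmin l]
    | some mx =>
      have hc : st.1.contains p.1 = true := by
        rw [PySem.Dict.contains_eq_isSome_get?, h1]; rfl
      have hmx : PySem.List.max? (pvVals p.1 P) (fun y => y) = some mx := by
        rw [← hmax p.1, h1]
      have hne : pvVals p.1 P ≠ [] := by
        intro h; rw [h] at hmx; simp [PySem.List.max?] at hmx
      obtain ⟨mn, hmn⟩ : ∃ mn, PySem.List.min? (pvVals p.1 P) (fun y => y) = some mn := by
        cases hv : pvVals p.1 P with
        | nil => exact absurd hv hne
        | cons a t => exact ⟨_, PySem.List.min?_id_cons a t⟩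
      have hmn2 : st.2.get? p.1 = some mn := by rw [hmin p.1, hmn]
      have hgetD : st.2.getD p.1 0 = mn := by rw [PySem.Dict.getD_eq_get?_getD, hmn2]; rfl
      constructor
      · simp only [pvUA, h1]
        have hmem : p.1 ∈ P.map Prod.fst := by
          have := (PySem.Dict.contains_iff_mem_keys st.1 p.1).mp hc
          rwa [hk, PySem.Set.mem_ofList] at this
        have hkeys1 : (if p.2 > mx then st.1.insert p.1 p.2 else st.1).keys = st.1.keys := by
          split
          · exact PySem.Dict.keys_insert_of_contains _ _ hc
          · rfl
        rw [hkeys1, hk, List.map_append, PySem.Set.ofList_eq_foldl, PySem.Set.ofList_eq_foldl,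
            List.foldl_append]
        simp only [List.map_cons, List.map_nil, List.foldl_cons, List.foldl_nil]
        rw [← PySem.Set.ofList_eq_foldl]
        simp [PySem.Set.add, PySem.Set.contains, PySem.Set.mem_ofList, hmem]
      · intro l
        simp only [pvUA, h1]
        by_cases hl : l = p.1
        · subst hl
          rw [pvVals_append]
          simp only [beq_self_eq_true, if_pos]
          rw [pvMax_append_singleton, pvMin_append_singleton, hmx, hmn, hgetD]
          constructor
          · split
            · simp [PySem.Dict.get?_insert_self, *]
            · simp only [h1]; congr 1; simp_all
          · split
            · simp [PySem.Dict.get?_insert_self, *]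
            · rw [hmn2]; congr 1; simp_all
        · have hf : (p.1 == l) = false := by simpa using fun h => hl h.symm
          rw [pvVals_append]
          simp only [hf, if_neg, Bool.false_eq_true, not_false_iff, List.append_nil]
          constructor
          · split
            · rw [PySem.Dict.get?_insert_of_ne _ _ hl]; exact hmax l
            · exact hmax l
          · split
            · rw [PySem.Dict.get?_insert_of_ne _ _ hl]; exact hmin l
            · exact hmin l

-- inserting fresh keys one by one: the resulting dict's items, literally
theorem pvItems_foldl_insert_fresh (ks : List String) (f : String → Int)
    (d : PySem.Dict String Int) (hn : ks.Nodup) (hf : ∀ l ∈ ks, d.contains l = false) :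
    (ks.foldl (fun d l => d.insert l (f l)) d).items = d.items ++ ks.map (fun l => (l, f l)) := by
  induction ks generalizing d with
  | nil => simp
  | cons k t ih =>
    simp only [List.foldl_cons, List.map_cons]
    have hk : d.contains k = false := hf k (by simp)
    rw [ih _ (List.Nodup.of_cons hn) ?_]
    · rw [PySem.Dict.items_insert_of_not_contains d (f k) hk]
      simp
    · intro l hl
      rw [PySem.Dict.contains_insert]
      have hlk : (l == k) = false := by
        simp only [List.nodup_cons] at hn
        simp only [beq_eq_false_iff_ne, ne_eq]
        intro h; exact hn.1 (h ▸ hl)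
      simp [hlk, hf l (List.mem_cons_of_mem _ hl)]

-- A's nested loops, flattened to one fold over the pair stream
theorem pvA_flat (raw_data : List (String × List (String × Int))) (labels : List String) (set_key : Option String) :
    get_range_in_labels raw_data labels set_key =
    (let st := (raw_data.flatMap (fun uv => pvPairsOf labels (pvResp set_key uv))).foldl pvUA
        (PySem.Dict.empty, PySem.Dict.empty)
     (st.1.keys.foldl (fun (d : PySem.Dict String Int) label =>
        d.insert label (st.1.getD label 0 - st.2.getD label 0)) PySem.Dict.empty).items) := by
  unfold get_range_in_labels
  rw [List.foldl_flatMap]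
  have key : ∀ (P : List (String × List (String × Int)))
      (init : PySem.Dict String Int × PySem.Dict String Int),
      P.foldl (fun st uv =>
        let response : PySem.Dict String Int :=
          match set_key with
          | none => PySem.Dict.mk uv.2
          | some _ => PySem.Dict.mk []
        labels.foldl (fun st label =>
          match response.get? label with
          | none => st
          | some v =>
            match st.1.get? label with
            | none => (st.1.insert label v, st.2.insert label v)
            | some mx =>
              ((if v > mx then st.1.insert label v else st.1),
               (if v < st.2.getD label 0 then st.2.insert label v else st.2))) st) init
      = P.foldl (fun acc uv => (pvPairsOf labels (pvResp set_key uv)).foldl pvUA acc) init := by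
    intro P
    induction P with
    | nil => intro init; rfl
    | cons uv t ih =>
      intro init
      simp only [List.foldl_cons]
      rw [← ih]
      congr 1
      exact pvFoldl_labels_filterMap (pvResp set_key uv) pvUA labels init
  rw [key]

-- B's nested loops, flattened to one fold over the same pair stream
theorem pvB_flat (raw_data : List (String × List (String × Int))) (labels : List String) (set_key : Option String) :
    get_range_in_labels_alt raw_data labels set_key =
    (let groups := (raw_data.flatMap (fun uv => pvPairsOf labels (pvResp set_key uv))).foldl pvUB
        PySem.Dict.empty
     groups.items.map (fun p =>
       (p.1, (PySem.List.max? p.2 (fun y => y)).getD 0 - (PySem.List.min? p.2 (fun y => y)).getD 0))) := by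
  unfold get_range_in_labels_alt
  rw [List.foldl_flatMap]
  have key : ∀ (P : List (String × List (String × Int))) (init : PySem.Dict String (List Int)),
      P.foldl (fun g uv =>
        let response : PySem.Dict String Int :=
          match set_key with
          | none => PySem.Dict.mk uv.2
          | some _ => PySem.Dict.mk []
        labels.foldl (fun g label =>
          match response.get? label with
          | none => g
          | some v => g.modify label [] (· ++ [v])) g) init
      = P.foldl (fun acc uv => (pvPairsOf labels (pvResp set_key uv)).foldl pvUB acc) init := by
    intro P
    induction P with
    | nil => intro init; rfl
    | cons uv t ih =>
      intro init
      simp only [List.foldl_cons]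
      rw [← ih]
      congr 1
      exact pvFoldl_labels_filterMap (pvResp set_key uv) pvUB labels init
  rw [key]

theorem pvMain (raw_data : List (String × List (String × Int))) (labels : List String) (set_key : Option String) :
    get_range_in_labels raw_data labels set_key = get_range_in_labels_alt raw_data labels set_key := by
  rw [pvA_flat, pvB_flat]
  set P := raw_data.flatMap (fun uv => pvPairsOf labels (pvResp set_key uv)) with hP
  simp only []
  set st := P.foldl pvUA (PySem.Dict.empty, PySem.Dict.empty) with hst
  set groups := P.foldl pvUB PySem.Dict.empty with hgroups
  obtain ⟨hk, hg⟩ := pvAinv P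
  have hBkeys : groups.keys = PySem.Set.ofList (P.map Prod.fst) := by
    rw [hgroups]
    unfold pvUB
    rw [PySem.Dict.keys_foldl_modify_key P Prod.fst [] (fun _ p vs => vs ++ [p.2]) PySem.Dict.empty]
    rfl
  have hnodup : (PySem.Set.ofList (P.map Prod.fst) : List String).Nodup :=
    PySem.Set.nodup_ofList _
  have hgetD : ∀ l, groups.getD l [] = pvVals l P := by
    intro l
    rw [hgroups]
    unfold pvUB
    rw [PySem.Dict.getD_foldl_modify_append P PySem.Dict.empty l]
    simp [pvVals, PySem.Dict.getD_empty]
  have hA : (st.1.keys.foldl (fun (d : PySem.Dict String Int) label =>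
        d.insert label (st.1.getD label 0 - st.2.getD label 0)) PySem.Dict.empty).items
      = st.1.keys.map (fun l => (l, st.1.getD l 0 - st.2.getD l 0)) := by
    rw [pvItems_foldl_insert_fresh _ _ _ (hk ▸ hnodup) (fun l _ => PySem.Dict.contains_empty l)]
    rfl
  have hB : groups.items.map (fun p =>
        (p.1, (PySem.List.max? p.2 (fun y => y)).getD 0 - (PySem.List.min? p.2 (fun y => y)).getD 0))
      = groups.keys.map (fun l =>
        (l, (PySem.List.max? (pvVals l P) (fun y => y)).getD 0
          - (PySem.List.min? (pvVals l P) (fun y => y)).getD 0)) := by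
    have hkeysdef : groups.keys = groups.items.map Prod.fst := rfl
    rw [hkeysdef, List.map_map]
    apply List.map_congr_left
    intro p hp
    have hpm : (p.1, p.2) ∈ groups.items := by simpa using hp
    have hv : groups.getD p.1 [] = p.2 :=
      PySem.Dict.getD_of_mem_items _ hpm (hBkeys ▸ hnodup) []
    rw [← hv, hgetD p.1]
    rfl
  rw [hA, hB, hk, hBkeys]
  apply List.map_congr_left
  intro l hl
  have hmem : l ∈ P.map Prod.fst := (PySem.Set.mem_ofList _ _).mp hl
  have hne : pvVals l P ≠ [] := by
    obtain ⟨q, hq, hQl⟩ := List.mem_map.mp hmem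
    simp only [pvVals, ne_eq, List.map_eq_nil_iff, List.filter_eq_nil_iff]
    intro h
    exact h q hq (by simpa using hQl)
  obtain ⟨m, hm⟩ : ∃ m, PySem.List.max? (pvVals l P) (fun y => y) = some m := by
    cases hv : pvVals l P with
    | nil => exact absurd hv hne
    | cons a t => exact ⟨_, PySem.List.max?_id_cons a t⟩
  obtain ⟨n, hn⟩ : ∃ n, PySem.List.min? (pvVals l P) (fun y => y) = some n := by
    cases hv : pvVals l P with
    | nil => exact absurd hv hne
    | cons a t => exact ⟨_, PySem.List.min?_id_cons a t⟩
  have h1 : st.1.getD l 0 = m := by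
    rw [PySem.Dict.getD_eq_get?_getD, (hg l).1, hm]; rfl
  have h2 : st.2.getD l 0 = n := by
    rw [PySem.Dict.getD_eq_get?_getD, (hg l).2, hn]; rfl
  rw [h1, h2, hm, hn]
  rfl

-- ===== VERDICT (by name: the statement is the Claim_ definition above) =====
theorem get_range_in_labels_spec : Claim_equal_get_range_in_labels := by
  intro raw_data labels set_key _ _
  exact pvMain raw_data labels set_key
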